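-- pv_equiv track=rewrite | github.com/sebagonz106/Chain-Of-Table | utils/table_ops.py | validate_table
-- ===== SOURCE A (Python) =====
-- from typing import List, Dict, Any, Union
--
-- def validate_table(table: List[Dict]) -> bool:
--     """
--     Validates that the table has the correct format.
--
--     Args:
--         table: List of dictionaries representing the table
--
--     Returns:
--         True if table is valid, False otherwise
--     """
--     if not isinstance(table, list):
--         return False
--
--     if not table:
--         return True  # Empty table is valid
--
--     # Check that all elements are dictionaries
--     if not all(isinstance(row, dict) for row in table):
--         return False
--
--     # Check that all rows have the same columns
--     if table:
--         first_keys = set(table[0].keys())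
--         if not all(set(row.keys()) == first_keys for row in table):
--             return False
--
--     return True
-- ===== SOURCE B (Python) =====
-- def validate_table(table):
--     """Alternative algorithm: accumulate the intersection and the union of all
--     rows' key sets in one fold; the columns are uniform iff intersection == union
--     (every row's key set lies between them, so they coincide iff all are equal)."""
--     if not isinstance(table, list):
--         return False
--     if not table:
--         return True
--     inter = None
--     union = set()
--     for row in table:
--         if not isinstance(row, dict):
--             return False
--         ks = set(row.keys())
--         union = union | ks
--         inter = ks if inter is None else inter & ks
--     return inter == union
-- ===== Notes on version B (the rewrite author's own statement) =====
-- stated objective: alternative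
-- what changed: Instead of comparing each row's key set to the first row's, B folds two accumulators over the rows - the intersection and the union of all key sets - and returns whether they are equal; since every row's key set lies between intersection and union, they coincide exactly when all rows share the same columns.
import Mathlib
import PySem

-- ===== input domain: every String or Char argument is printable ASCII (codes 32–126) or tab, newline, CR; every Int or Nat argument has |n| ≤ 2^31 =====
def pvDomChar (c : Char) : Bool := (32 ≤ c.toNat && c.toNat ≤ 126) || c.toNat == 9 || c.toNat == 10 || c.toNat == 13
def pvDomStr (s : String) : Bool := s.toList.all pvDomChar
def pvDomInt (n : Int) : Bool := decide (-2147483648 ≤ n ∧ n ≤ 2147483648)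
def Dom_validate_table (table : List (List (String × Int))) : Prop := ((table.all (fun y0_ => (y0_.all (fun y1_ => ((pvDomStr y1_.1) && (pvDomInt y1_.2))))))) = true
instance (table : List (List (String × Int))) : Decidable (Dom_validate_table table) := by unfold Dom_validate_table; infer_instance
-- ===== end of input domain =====

-- B replaces A's compare-every-row-to-the-first-row pass by folding the intersection
-- and the union of all rows' key sets and testing their equality (alternative algorithm, same cost).


-- ===== PORT A =====
-- set(row.keys()) for a dict modelled as an association list: the distinct keys
def pvKeySet (row : List (String × Int)) : PySem.Set String :=
  PySem.Set.ofList (row.map Prod.fst)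

-- the isinstance guards are vacuous under the Lean type; the branches stay in A's order
def validate_table (table : List (List (String × Int))) : Bool :=
  match table with
  | [] => true  -- empty table is valid
  | r0 :: _ =>
    -- first_keys = set(table[0].keys()); all(set(row.keys()) == first_keys …)
    if !(table.all (fun row => PySem.Set.equal (pvKeySet row) (pvKeySet r0))) then false
    else true

-- ===== PORT B =====
-- one step of B's loop: update (inter, union) (None for inter before the first row)
def pvIUStep (acc : Option (PySem.Set String) × PySem.Set String)
    (row : List (String × Int)) : Option (PySem.Set String) × PySem.Set String :=
  let ks := pvKeySet row
  (some (match acc.1 with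
         | none => ks
         | some i => PySem.Set.inter i ks),
   PySem.Set.union acc.2 ks)

def validate_table_alt (table : List (List (String × Int))) : Bool :=
  match table with
  | [] => true
  | _ :: _ =>
    let st := table.foldl pvIUStep (none, PySem.Set.empty)
    match st.1 with
    | some i => PySem.Set.equal i st.2
    | none => true  -- unreachable: the table is nonempty

-- ===== PRECONDITION & SPEC =====
def Spec_validate_table (table : List (List (String × Int))) (out : Bool) : Prop := out = validate_table_alt table
instance (table : List (List (String × Int))) (out : Bool) : Decidable (Spec_validate_table table out) := by unfold Spec_validate_table; infer_instance

-- ===== CLAIM (what is proved, stated in full; the proofs are below) =====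
def Claim_equal_validate_table : Prop := ∀ (table : List (List (String × Int))), Dom_validate_table table → Spec_validate_table table (validate_table table)

-- ===== LEMMAS AND PROOFS =====

-- membership characterisation of the fold, started after the first row
lemma foldl_iu_mem (l : List (List (String × Int))) (i0 u0 : PySem.Set String) :
    ∃ I U, l.foldl pvIUStep (some i0, u0) = (some I, U) ∧
      (∀ x, x ∈ I ↔ x ∈ i0 ∧ ∀ r ∈ l, x ∈ pvKeySet r) ∧
      (∀ x, x ∈ U ↔ x ∈ u0 ∨ ∃ r ∈ l, x ∈ pvKeySet r) := by
  induction l generalizing i0 u0 with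
  | nil => exact ⟨i0, u0, rfl, by simp, by simp⟩
  | cons s t ih =>
    obtain ⟨I, U, hfold, hI, hU⟩ :=
      ih (PySem.Set.inter i0 (pvKeySet s)) (PySem.Set.union u0 (pvKeySet s))
    refine ⟨I, U, hfold, fun x => ?_, fun x => ?_⟩
    · rw [hI x, PySem.Set.mem_inter]; constructor
      · rintro ⟨⟨h1, h2⟩, h3⟩
        exact ⟨h1, fun r hr => by rcases List.mem_cons.1 hr with h | h
                                  · exact h ▸ h2
                                  · exact h3 r h⟩
      · rintro ⟨h1, h2⟩
        exact ⟨⟨h1, h2 s (List.mem_cons_self ..)⟩,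
               fun r hr => h2 r (List.mem_cons_of_mem _ hr)⟩
    · rw [hU x, PySem.Set.mem_union]
      constructor
      · rintro (⟨h | h⟩ | ⟨r, hr, hx⟩)
        · exact Or.inl h
        · exact Or.inr ⟨s, List.mem_cons_self .., h⟩
        · exact Or.inr ⟨r, List.mem_cons_of_mem _ hr, hx⟩
      · rintro (h | ⟨r, hr, hx⟩)
        · exact Or.inl (Or.inl h)
        · rcases List.mem_cons.1 hr with h | h
          · exact Or.inl (Or.inr (h ▸ hx))
          · exact Or.inr ⟨r, h, hx⟩

theorem validate_table_spec : Claim_equal_validate_table := by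
  intro table _
  match table with
  | [] => rfl
  | r0 :: rest =>
    show validate_table (r0 :: rest) = validate_table_alt (r0 :: rest)
    -- A's side: the all-rows-equal-first test
    have hA : validate_table (r0 :: rest)
        = (r0 :: rest).all (fun row => PySem.Set.equal (pvKeySet row) (pvKeySet r0)) := by
      show (if !((r0 :: rest).all fun row => PySem.Set.equal (pvKeySet row) (pvKeySet r0)) then false
            else true) = _
      cases h : (r0 :: rest).all fun row => PySem.Set.equal (pvKeySet row) (pvKeySet r0) <;> simp_all
    -- B's side: unfold the first fold step
    obtain ⟨I, U, hfold, hI, hU⟩ :=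
      foldl_iu_mem rest (pvKeySet r0) (PySem.Set.union PySem.Set.empty (pvKeySet r0))
    have hB : validate_table_alt (r0 :: rest) = PySem.Set.equal I U := by
      show (match ((r0 :: rest).foldl pvIUStep (none, PySem.Set.empty)).1 with
            | some i => PySem.Set.equal i ((r0 :: rest).foldl pvIUStep (none, PySem.Set.empty)).2
            | none => true) = _
      rw [List.foldl_cons]
      have : pvIUStep (none, PySem.Set.empty) r0
          = (some (pvKeySet r0), PySem.Set.union PySem.Set.empty (pvKeySet r0)) := rfl
      rw [this, hfold]
    rw [hA, hB, Bool.eq_iff_iff, List.all_eq_true, PySem.Set.equal_iff]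
    have hUmem : ∀ x, x ∈ U ↔ ∃ r ∈ r0 :: rest, x ∈ pvKeySet r := by
      intro x
      rw [hU x, PySem.Set.mem_union]
      simp only [PySem.Set.empty, List.not_mem_nil, false_or, List.mem_cons]
      constructor
      · rintro (h | ⟨r, hr, hx⟩)
        · exact ⟨r0, Or.inl rfl, h⟩
        · exact ⟨r, Or.inr hr, hx⟩
      · rintro ⟨r, h | h, hx⟩
        · exact Or.inl (h ▸ hx)
        · exact Or.inr ⟨r, h, hx⟩
    have hImem : ∀ x, x ∈ I ↔ ∀ r ∈ r0 :: rest, x ∈ pvKeySet r := by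
      intro x
      rw [hI x]
      constructor
      · rintro ⟨h0, hrest⟩ r hr
        rcases List.mem_cons.1 hr with h | h
        · exact h ▸ h0
        · exact hrest r h
      · intro h
        exact ⟨h r0 (List.mem_cons_self ..), fun r hr => h r (List.mem_cons_of_mem _ hr)⟩
    constructor
    · -- all rows equal the first ⇒ inter = union
      intro hall x
      rw [hImem x, hUmem x]
      constructor
      · rintro h
        exact ⟨r0, List.mem_cons_self .., h r0 (List.mem_cons_self ..)⟩
      · rintro ⟨r, hr, hx⟩ r' hr'
        have h1 := (PySem.Set.equal_iff _ _).1 (hall r hr) x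
        have h2 := (PySem.Set.equal_iff _ _).1 (hall r' hr') x
        exact h2.2 (h1.1 hx)
    · -- inter = union ⇒ every row's key set equals the first's
      intro h r hr
      rw [PySem.Set.equal_iff]
      intro x
      have hIU := h x
      rw [hImem x, hUmem x] at hIU
      constructor
      · intro hx
        exact (hIU.2 ⟨r, hr, hx⟩) r0 (List.mem_cons_self ..)
      · intro hx
        exact (hIU.2 ⟨r0, List.mem_cons_self .., hx⟩) r hr
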